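-- pv_equiv track=rewrite | github.com/1iamharshraj/PPS2 | RamanujanNum.py | IsRamanujanNum
-- ===== SOURCE A (Python) =====
-- from itertools import combinations, combinations_with_replacement
--
-- def IsRamanujanNum(N):
--     rang = list(range(1, N)) * 2
--     com = combinations(rang, 2)
--     for i1, i2 in com:
--         S = i1 ** 3 + i2 ** 3
--         if S == N:
--             return True
--     else:
--         return False
-- ===== SOURCE B (Python) =====
-- def IsRamanujanNum(N):
--     # largest j with (j+1)^3 < N becomes the upper pointer
--     j = 0
--     while (j + 1) ** 3 < N:
--         j += 1
--     i = 1
--     while i <= j: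
--         s = i ** 3 + j ** 3
--         if s == N:
--             return True
--         if s < N:
--             i += 1
--         else:
--             j -= 1
--     return False
-- ===== Notes on version B (the rewrite author's own statement) =====
-- stated objective: faster
-- what changed: Replaces the exhaustive scan of all pairs drawn from the doubled list range(1,N) with a two-pointer walk between 1 and the integer cube root of N-1, moving the low pointer up when the cube sum is too small and the high pointer down when too large.
import Mathlib
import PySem

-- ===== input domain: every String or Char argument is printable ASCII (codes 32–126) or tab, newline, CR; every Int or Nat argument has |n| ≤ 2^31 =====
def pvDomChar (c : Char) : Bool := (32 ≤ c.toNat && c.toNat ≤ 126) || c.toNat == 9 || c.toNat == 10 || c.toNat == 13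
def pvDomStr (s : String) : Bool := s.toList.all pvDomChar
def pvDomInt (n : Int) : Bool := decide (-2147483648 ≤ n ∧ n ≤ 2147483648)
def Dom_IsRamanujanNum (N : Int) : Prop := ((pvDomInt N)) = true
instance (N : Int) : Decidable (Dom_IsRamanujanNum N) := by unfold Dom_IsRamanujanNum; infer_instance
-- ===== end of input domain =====

-- B replaces A's O(N^2) scan of all pairs from the doubled list range(1,N) by a
-- two-pointer walk between 1 and the integer cube root bound (objective: faster, asymptotic).

-- ===== PORT A =====
-- itertools.combinations(l, 2): all (l[p], l[q]) with p < q, in order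
def pvComb2 (l : List Int) : List (Int × Int) :=
  match l with
  | [] => []
  | x :: xs => xs.map (fun y => (x, y)) ++ pvComb2 xs

-- the for-loop with early return
def pvLoopA (N : Int) : List (Int × Int) → Bool
  | [] => false
  | (i1, i2) :: rest => if i1 ^ 3 + i2 ^ 3 = N then true else pvLoopA N rest

def IsRamanujanNum (N : Int) : Bool :=
  pvLoopA N (pvComb2 (PySem.List.pyRange 1 N 1 ++ PySem.List.pyRange 1 N 1))

-- ===== PORT B =====
-- first while-loop of Source B: j starts at 0 and only increments, so it is a Nat;
-- the fuel argument only makes the loop total (N.toNat + 1 steps always suffice)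
def pvCbrt (N : Int) : Nat → Nat → Nat
  | 0, j => j
  | fuel + 1, j => if ((j : Int) + 1) ^ 3 < N then pvCbrt N fuel (j + 1) else j

-- second while-loop of Source B; fuel is again only a totality guard
def pvScan (N : Int) : Nat → Int → Int → Bool
  | 0, _, _ => false
  | fuel + 1, i, j =>
    if i ≤ j then
      if i ^ 3 + j ^ 3 = N then true
      else if i ^ 3 + j ^ 3 < N then pvScan N fuel (i + 1) j
      else pvScan N fuel i (j - 1)
    else false

def IsRamanujanNum_alt (N : Int) : Bool :=
  let j0 : Nat := pvCbrt N (N.toNat + 1) 0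
  pvScan N (j0 + 1) 1 (j0 : Int)

-- ===== PRECONDITION & SPEC =====
def Spec_IsRamanujanNum (N : Int) (out : Bool) : Prop := out = IsRamanujanNum_alt N
instance (N : Int) (out : Bool) : Decidable (Spec_IsRamanujanNum N out) := by unfold Spec_IsRamanujanNum; infer_instance

-- ===== CLAIM (what is proved, stated in full; the proofs are below) =====
def Claim_equal_IsRamanujanNum : Prop := ∀ (N : Int), Dom_IsRamanujanNum N → Spec_IsRamanujanNum N (IsRamanujanNum N)

-- ===== LEMMAS AND PROOFS =====

theorem cube_le_cube {a b : Int} (h : a ≤ b) : a ^ 3 ≤ b ^ 3 := by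
  nlinarith [sq_nonneg (a + b), sq_nonneg (a - b), sq_nonneg a, sq_nonneg b]

theorem lt_of_cube_lt {a b : Int} (h : a ^ 3 < b ^ 3) : a < b := by
  by_contra hc
  exact absurd (cube_le_cube (by omega : b ≤ a)) (by omega)

theorem pvLoopA_iff (N : Int) (l : List (Int × Int)) :
    pvLoopA N l = true ↔ ∃ p ∈ l, p.1 ^ 3 + p.2 ^ 3 = N := by
  induction l with
  | nil => simp [pvLoopA]
  | cons p rest ih =>
    obtain ⟨i1, i2⟩ := p
    by_cases h : i1 ^ 3 + i2 ^ 3 = N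
    · simp [pvLoopA, h]
    · simp [pvLoopA, h, ih]

theorem pvComb2_mem {l : List Int} {a b : Int} (h : (a, b) ∈ pvComb2 l) :
    a ∈ l ∧ b ∈ l := by
  induction l with
  | nil => simp [pvComb2] at h
  | cons x xs ih =>
    simp only [pvComb2, List.mem_append, List.mem_map] at h
    rcases h with ⟨y, hy, he⟩ | h
    · injection he with h1 h2
      subst h1; subst h2
      exact ⟨List.mem_cons_self, List.mem_cons_of_mem _ hy⟩
    · exact ⟨List.mem_cons_of_mem _ (ih h).1, List.mem_cons_of_mem _ (ih h).2⟩

theorem pvComb2_mem_append {u v : List Int} {a b : Int} (ha : a ∈ u) (hb : b ∈ v) :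
    (a, b) ∈ pvComb2 (u ++ v) := by
  induction u with
  | nil => simp at ha
  | cons x xs ih =>
    simp only [List.cons_append, pvComb2, List.mem_append, List.mem_map]
    rcases List.mem_cons.mp ha with rfl | ha
    · exact Or.inl ⟨b, Or.inr hb, rfl⟩
    · exact Or.inr (ih ha)

theorem IsRamanujanNum_iff (N : Int) :
    IsRamanujanNum N = true ↔ ∃ a b : Int, 1 ≤ a ∧ a < N ∧ 1 ≤ b ∧ b < N ∧ a ^ 3 + b ^ 3 = N := by
  unfold IsRamanujanNum
  rw [pvLoopA_iff]
  constructor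
  · rintro ⟨⟨a, b⟩, hmem, hsum⟩
    have h := pvComb2_mem hmem
    have ha := List.mem_append.mp h.1
    have hb := List.mem_append.mp h.2
    have ha' : a ∈ PySem.List.pyRange 1 N 1 := by rcases ha with h | h <;> exact h
    have hb' : b ∈ PySem.List.pyRange 1 N 1 := by rcases hb with h | h <;> exact h
    rw [PySem.List.mem_pyRange_one] at ha' hb'
    exact ⟨a, b, ha'.1, ha'.2, hb'.1, hb'.2, hsum⟩
  · rintro ⟨a, b, h1, h2, h3, h4, hsum⟩
    refine ⟨(a, b), pvComb2_mem_append ?_ ?_, hsum⟩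
    · exact PySem.List.mem_pyRange_one.mpr ⟨h1, h2⟩
    · exact PySem.List.mem_pyRange_one.mpr ⟨h3, h4⟩

theorem self_le_cube {b : Int} (hb : 1 ≤ b) : b ≤ b ^ 3 := by
  nlinarith [sq_nonneg b, sq_nonneg (b - 1)]

theorem pvCbrt_ge (N : Int) (fuel j : Nat) (h : N < (j : Int) + (fuel : Int) + 1) :
    N ≤ (((pvCbrt N fuel j : Nat) : Int) + 1) ^ 3 := by
  induction fuel generalizing j with
  | zero =>
    simp only [pvCbrt]
    have h1 : (1 : Int) ≤ (j : Int) + 1 := by omega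
    have := self_le_cube h1
    omega
  | succ fuel ih =>
    rw [pvCbrt]
    split
    · exact ih (j + 1) (by push_cast; push_cast at h; omega)
    · omega

theorem pvScan_iff (N : Int) (fuel : Nat) (i j : Int) (hf : j - i + 1 < (fuel : Int)) :
    pvScan N fuel i j = true ↔ ∃ a b : Int, i ≤ a ∧ a ≤ b ∧ b ≤ j ∧ a ^ 3 + b ^ 3 = N := by
  induction fuel generalizing i j with
  | zero =>
    simp only [pvScan, Bool.false_eq_true, false_iff]
    rintro ⟨a, b, h1, h2, h3, _⟩
    simp only [Nat.cast_zero] at hf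
    omega
  | succ fuel ih =>
    rw [pvScan]
    by_cases hij : i ≤ j
    · rw [if_pos hij]
      by_cases heq : i ^ 3 + j ^ 3 = N
      · rw [if_pos heq]
        exact ⟨fun _ => ⟨i, j, le_refl i, hij, le_refl j, heq⟩, fun _ => rfl⟩
      · rw [if_neg heq]
        by_cases hlt : i ^ 3 + j ^ 3 < N
        · rw [if_pos hlt, ih (i + 1) j (by push_cast at hf ⊢; omega)]
          constructor
          · rintro ⟨a, b, h1, h2, h3, h4⟩; exact ⟨a, b, by omega, h2, h3, h4⟩
          · rintro ⟨a, b, h1, h2, h3, h4⟩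
            refine ⟨a, b, ?_, h2, h3, h4⟩
            rcases lt_or_eq_of_le h1 with h | h
            · omega
            · exfalso
              have : b ^ 3 ≤ j ^ 3 := cube_le_cube h3
              subst h
              omega
        · rw [if_neg hlt, ih i (j - 1) (by push_cast at hf ⊢; omega)]
          constructor
          · rintro ⟨a, b, h1, h2, h3, h4⟩; exact ⟨a, b, h1, h2, by omega, h4⟩
          · rintro ⟨a, b, h1, h2, h3, h4⟩
            refine ⟨a, b, h1, h2, ?_, h4⟩
            rcases lt_or_eq_of_le h3 with h | h
            · omega
            · exfalso
              have : a ^ 3 ≥ i ^ 3 := cube_le_cube h1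
              subst h
              omega
    · rw [if_neg hij]
      simp only [Bool.false_eq_true, false_iff]
      rintro ⟨a, b, h1, h2, h3, _⟩
      omega

theorem main_equiv (N : Int) : IsRamanujanNum N = IsRamanujanNum_alt N := by
  have hc : N ≤ (((pvCbrt N (N.toNat + 1) 0 : Nat) : Int) + 1) ^ 3 := by
    apply pvCbrt_ge
    push_cast
    omega
  set j0 : Int := ((pvCbrt N (N.toNat + 1) 0 : Nat) : Int) with hj0
  have hj0nn : 0 ≤ j0 := Int.natCast_nonneg _
  rw [Bool.eq_iff_iff, IsRamanujanNum_iff]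
  show _ ↔ pvScan N (pvCbrt N (N.toNat + 1) 0 + 1) 1 j0 = true
  rw [pvScan_iff N _ 1 j0 (by push_cast; omega)]
  constructor
  · rintro ⟨a, b, h1, h2, h3, h4, hsum⟩
    -- wlog a ≤ b; the larger one is below the cube-root bound
    have key : ∀ x y : Int, 1 ≤ x → x ≤ y → x ^ 3 + y ^ 3 = N →
        ∃ a b : Int, 1 ≤ a ∧ a ≤ b ∧ b ≤ j0 ∧ a ^ 3 + b ^ 3 = N := by
      intro x y hx hxy hs
      have hx3 : 1 ≤ x ^ 3 := by nlinarith [sq_nonneg x]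
      have hy3 : y ^ 3 < (j0 + 1) ^ 3 := by omega
      have : y < j0 + 1 := lt_of_cube_lt hy3
      exact ⟨x, y, hx, hxy, by omega, hs⟩
    rcases le_total a b with h | h
    · exact key a b h1 h hsum
    · exact key b a h3 h (by omega)
  · rintro ⟨a, b, h1, h2, h3, hsum⟩
    have ha1 : 1 ≤ a := h1
    have hb1 : 1 ≤ b := by omega
    have ha3 : 1 ≤ a ^ 3 := by nlinarith [sq_nonneg a]
    have hb3 : b ^ 3 < N := by omega
    have hbN : b < N := by have := self_le_cube hb1; omega
    exact ⟨a, b, ha1, by omega, hb1, by omega, hsum⟩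

-- ===== VERDICT (by name: the statement is the Claim_ definition above) =====
theorem IsRamanujanNum_spec : Claim_equal_IsRamanujanNum := by
  intro N _
  exact main_equiv N
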